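-- pv_equiv track=rewrite | github.com/averagehuman/argskwargs.io | src/code/blankinship/gcd.py | idivide
-- ===== SOURCE A (Python) =====
-- def idivide(a, b):
--     """
--     The original Euclidean method of finding a Greatest Common Divisor using
--     repeated subtraction rather than applying the 'mod' operator directly.
--
--     To divide 'b' into 'a' is to find the 'q' and 'r' such that:
--
--         a = b.q + r
--
--     and this is done by repeatedly subtracting 'b'.
--
--     This is an iterator which yields 'b' each time it is subtracted from the
--     associated 'a', up until the point that 'a' becomes less than 'b', and then
--     the 'b' becomes the new 'a', and the remainder 'r' becomes the new 'b', and
--     the subtraction continues. Stop when there is no remainder. (For convenience,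
--     also yield the first a).
--
--     So with input a=1071 and b=462, the sequence generated is:
--
--         [1071, 462, 462, 147, 147, 147, 21, 21, 21, 21, 21, 21, 21]
--
--     ie. 462 is taken from 1071 twice (q=2), 147 is taken from 462 three times (q=3),
--     and 21 is taken from 147 seven times (q=7).
--     """
--     a = int(a)
--     b = int(b)
--     if a <= 0 or b <= 0:
--         raise ValueError("Invalid input. Expecting two positive integers")
--     if a < b:
--         a, b = b, a
--     yield a
--     r = 0
--     while a != b:
--         r = a - b
--         if r > 0:
--             a = r
--             yield b
--         else:
--             b = -r
--             yield a
--     if r: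
--         yield abs(r)
-- ===== SOURCE B (Python) =====
-- def idivide(a, b):
--     a = int(a)
--     b = int(b)
--     if a <= 0 or b <= 0:
--         raise ValueError("Invalid input. Expecting two positive integers")
--     hi, lo = max(a, b), min(a, b)
--     yield hi
--     if hi == lo:
--         return  # gcd(a, a): A yields only [a]
--     # phase 1: collect the continued-fraction stages (quotient, divisor) of Euclid's algorithm
--     stages = []
--     x, y = hi, lo
--     while y:
--         stages.append((x // y, y))
--         x, y = y, x % y
--     # phase 2: each stage's divisor was subtracted quotient-many times
--     for q, d in stages:
--         for _ in range(q):
--             yield d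
-- ===== Notes on version B (the rewrite author's own statement) =====
-- stated objective: idiomatic
-- what changed: Replaces A's per-subtraction state machine (sign-of-remainder branch updating a or b, trailing abs(r) yield) with a two-phase division-based method: first collect Euclid's (quotient, divisor) stages with divmod, then emit each divisor quotient-many times.
import Mathlib
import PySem

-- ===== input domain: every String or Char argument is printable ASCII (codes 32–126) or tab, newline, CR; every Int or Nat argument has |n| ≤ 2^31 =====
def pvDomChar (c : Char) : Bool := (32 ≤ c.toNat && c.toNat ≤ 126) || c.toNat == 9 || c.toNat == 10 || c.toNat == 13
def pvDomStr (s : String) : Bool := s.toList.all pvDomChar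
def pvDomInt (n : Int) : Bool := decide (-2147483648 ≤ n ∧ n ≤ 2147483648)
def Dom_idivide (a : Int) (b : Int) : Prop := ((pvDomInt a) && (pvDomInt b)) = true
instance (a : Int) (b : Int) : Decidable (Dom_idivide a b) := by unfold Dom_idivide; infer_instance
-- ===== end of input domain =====

-- B replaces A's per-subtraction state machine with a two-phase division-based method
-- (collect Euclid's (quotient, divisor) stages, then emit each divisor quotient-many
-- times): idiomatic, same output. Both Pythons are generators; equivalence is about
-- the yielded sequence as a list.

-- ===== PORT A =====
-- A's while-loop: state (a, b, r); fuel only makes the recursion total — under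
-- Pre_ (a, b > 0) the sum a + b strictly decreases, so (a+b).toNat fuel suffices.
def idivideLoopA : Nat → Int → Int → Int → List Int
  | 0, _, _, _ => []
  | fuel+1, a, b, r =>
    if a ≠ b then
      let r' := a - b
      if r' > 0 then b :: idivideLoopA fuel r' b r'
      else a :: idivideLoopA fuel a (-r') r'
    else -- loop ended: "if r: yield abs(r)"
      if r ≠ 0 then [|r|] else []

def idivide (a : Int) (b : Int) : List Int :=
  if a ≤ 0 ∨ b ≤ 0 then []   -- Python raises ValueError: outside Pre_
  else
    let a' := if a < b then b else a
    let b' := if a < b then a else b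
    a' :: idivideLoopA (a' + b').toNat a' b' 0

-- ===== PORT B =====
-- phase 1 of B: the `while y:` loop collecting (x // y, y) stage pairs;
-- fuel (x + y).toNat suffices since x + y strictly decreases on positive state.
def idivideStages : Nat → Int → Int → List (Int × Int)
  | 0, _, _ => []
  | fuel+1, x, y =>
    if y ≠ 0 then
      (PySem.Int.floordiv x y, y) :: idivideStages fuel y (PySem.Int.mod x y)
    else []

-- phase 2 of B: `for q, d in stages: for _ in range(q): yield d`.
def idivideEmit (stages : List (Int × Int)) : List Int :=
  stages.flatMap fun qd => List.replicate qd.1.toNat qd.2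

def idivide_alt (a : Int) (b : Int) : List Int :=
  if a ≤ 0 ∨ b ≤ 0 then []   -- Python raises ValueError: outside Pre_
  else
    let hi := max a b
    let lo := min a b
    hi :: (if hi = lo then [] else idivideEmit (idivideStages (hi + lo).toNat hi lo))

-- ===== PRECONDITION & SPEC =====
-- A raises ValueError unless both arguments are positive.
def Pre_idivide (a : Int) (b : Int) : Prop := 0 < a ∧ 0 < b
instance (a : Int) (b : Int) : Decidable (Pre_idivide a b) := by unfold Pre_idivide; infer_instance
def pvWitness_idivide : Int × Int := (1071, 462)

def Spec_idivide (a : Int) (b : Int) (out : List Int) : Prop := out = idivide_alt a b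
instance (a : Int) (b : Int) (out : List Int) : Decidable (Spec_idivide a b out) := by unfold Spec_idivide; infer_instance

-- ===== CLAIM (what is proved, stated in full; the proofs are below) =====
def Claim_equal_idivide : Prop := ∀ (a : Int) (b : Int), Dom_idivide a b → Pre_idivide a b → Spec_idivide a b (idivide a b)

-- ===== LEMMAS AND PROOFS =====

-- Reference: the subtractive-gcd yield sequence, ending in the gcd itself.
def subgcd (a b : Int) : List Int :=
  if a ≤ 0 ∨ b ≤ 0 then []
  else if a = b then [a]
  else min a b :: subgcd (min a b) (max a b - min a b)
termination_by (a + b).toNat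
decreasing_by omega

theorem subgcd_comm (a b : Int) : subgcd a b = subgcd b a := by
  conv_lhs => rw [subgcd]
  conv_rhs => rw [subgcd]
  simp only [min_comm a b, max_comm a b, or_comm, eq_comm]
  split_ifs with h1 h2
  · rfl
  · rw [h2]
  · rfl

theorem subgcd_self (a : Int) (ha : 0 < a) : subgcd a a = [a] := by
  rw [subgcd]; simp; omega

theorem loopA_eq_subgcd : ∀ (fuel : Nat) (a b r : Int), 0 < a → 0 < b →
    (a + b).toNat ≤ fuel →
    idivideLoopA fuel a b r = if a = b then (if r = 0 then [] else [|r|]) else subgcd a b := by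
  intro fuel
  induction fuel with
  | zero => intro a b r ha hb hf; omega
  | succ f ih =>
    intro a b r ha hb hf
    rw [idivideLoopA]
    by_cases hab : a = b
    · rw [if_neg (not_not_intro hab), if_pos hab]
      by_cases hr : r = 0 <;> simp [hr]
    · rw [if_pos hab, if_neg hab]
      by_cases hgt : a - b > 0
      · -- a > b: yield b, state (a-b, b, a-b)
        simp only [if_pos hgt]
        rw [ih (a-b) b (a-b) (by omega) hb (by omega)]
        conv_rhs => rw [subgcd]
        rw [if_neg (by omega : ¬ (a ≤ 0 ∨ b ≤ 0)), if_neg hab,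
            min_eq_right (by omega : b ≤ a), max_eq_left (by omega : b ≤ a)]
        congr 1
        by_cases h2 : a - b = b
        · rw [if_pos h2, if_neg (by omega : ¬ (a - b = 0)), h2, subgcd_self b hb,
              abs_of_pos hb]
        · rw [if_neg h2, subgcd_comm]
      · -- a < b: yield a, state (a, b-a, a-b)
        rw [if_neg hgt]
        have hneg : -(a - b) = b - a := by ring
        rw [hneg, ih a (b-a) (a-b) ha (by omega) (by omega)]
        conv_rhs => rw [subgcd]
        rw [if_neg (by omega : ¬ (a ≤ 0 ∨ b ≤ 0)), if_neg hab,
            min_eq_left (by omega : a ≤ b), max_eq_right (by omega : a ≤ b)]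
        congr 1
        by_cases h2 : a = b - a
        · rw [if_pos h2, if_neg (by omega : ¬ (a - b = 0)), ← h2, subgcd_self a ha,
              abs_of_neg (by omega : a - b < 0)]
          congr 1; omega
        · rw [if_neg h2]

theorem subgcd_eq_stage_aux : ∀ (n : Nat) (a b : Int), a.toNat ≤ n → 0 < b → b ≤ a →
    subgcd a b = List.replicate (a / b).toNat b ++
      (if a % b = 0 then [] else subgcd b (a % b)) := by
  intro n
  induction n with
  | zero => intro a b hn hb hba; omega
  | succ n ih =>
    intro a b hn hb hba
    have hqr := Int.ediv_add_emod a b -- b * (a / b) + a % b = a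
    have hr0 : 0 ≤ a % b := Int.emod_nonneg a (by omega)
    have hrb : a % b < b := Int.emod_lt_of_pos a hb
    have hq1 : 1 ≤ a / b := by
      rw [Int.le_ediv_iff_mul_le hb]; omega
    by_cases hab : a = b
    · subst hab
      rw [subgcd_self a hb, Int.ediv_self (by omega), Int.emod_self]
      simp
    · have hlt : b < a := by omega
      conv_lhs => rw [subgcd]
      rw [if_neg (by omega : ¬ (a ≤ 0 ∨ b ≤ 0)), if_neg hab,
          min_eq_right (by omega : b ≤ a), max_eq_left (by omega : b ≤ a)]
      by_cases h2 : a - b < b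
      · -- last subtraction of this stage: q = 1, r = a - b
        have hq : a / b = 1 := by
          have := (Int.ediv_lt_iff_lt_mul hb (a := a) (b := 2)).mpr (by omega)
          omega
        rw [hq] at hqr
        have hr : a % b = a - b := by omega
        rw [hq, hr, if_neg (by omega : ¬ (a - b = 0))]
        simp [List.replicate]
      · -- more subtractions remain: peel one off
        have hq2 : 2 ≤ a / b := by
          rw [Int.le_ediv_iff_mul_le hb]; omega
        have hdiv : (a - b) / b = a / b - 1 := by
          have := Int.add_mul_ediv_right a (-1) (c := b) (by omega)
          simpa [sub_eq_add_neg, neg_mul] using this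
        have hmod : (a - b) % b = a % b := Int.sub_emod_right a b
        rw [subgcd_comm, ih (a - b) b (by omega) hb (by omega), hdiv, hmod]
        have hrep : List.replicate (a / b).toNat b = b :: List.replicate (a / b - 1).toNat b := by
          have : (a / b).toNat = (a / b - 1).toNat + 1 := by omega
          rw [this, List.replicate_succ]
        rw [hrep]
        simp

theorem subgcd_eq_stage (a b : Int) (hb : 0 < b) (hba : b ≤ a) :
    subgcd a b = List.replicate (a / b).toNat b ++
      (if a % b = 0 then [] else subgcd b (a % b)) :=
  subgcd_eq_stage_aux a.toNat a b le_rfl hb hba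

theorem stages_zero (f : Nat) (b : Int) : idivideEmit (idivideStages f b 0) = [] := by
  cases f <;> simp [idivideStages, idivideEmit]

theorem emit_eq_subgcd : ∀ (n fuel : Nat) (a b : Int), 0 < b → b < a →
    (a + b).toNat ≤ n → (a + b).toNat ≤ fuel →
    idivideEmit (idivideStages fuel a b) = subgcd a b := by
  intro n
  induction n with
  | zero => intro fuel a b hb hba hn hf; omega
  | succ n ih =>
    intro fuel a b hb hba hn hf
    match fuel with
    | 0 => omega
    | f + 1 =>
      rw [idivideStages, if_pos (by omega : b ≠ 0)]
      unfold idivideEmit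
      rw [List.flatMap_cons]
      have : (idivideStages f b (PySem.Int.mod a b)).flatMap
          (fun qd => List.replicate qd.1.toNat qd.2) =
          idivideEmit (idivideStages f b (PySem.Int.mod a b)) := rfl
      rw [this]
      rw [PySem.Int.floordiv_eq_ediv_of_pos hb, PySem.Int.mod_eq_emod_of_pos hb,
          subgcd_eq_stage a b hb (by omega)]
      have hr0 : 0 ≤ a % b := Int.emod_nonneg a (by omega)
      have hrb : a % b < b := Int.emod_lt_of_pos a hb
      by_cases hr : a % b = 0
      · rw [hr, stages_zero, if_pos rfl]
      · rw [if_neg hr, ih f b (a % b) (by omega) (by omega) (by omega) (by omega)]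

-- ===== VERDICT (by name: the statement is the Claim_ definition above) =====
theorem idivide_spec : Claim_equal_idivide := by
  intro a b _ hpre
  obtain ⟨ha, hb⟩ := hpre
  unfold Spec_idivide idivide idivide_alt
  have hno : ¬ (a ≤ 0 ∨ b ≤ 0) := by omega
  simp only [hno, if_false]
  by_cases hab : a < b
  · -- swapped: hi = b, lo = a, with a < b
    simp only [hab, if_true, max_eq_right (le_of_lt hab), min_eq_left (le_of_lt hab)]
    rw [loopA_eq_subgcd _ _ _ _ hb ha le_rfl]
    have hne : ¬ (b = a) := by omega
    simp only [hne, if_false]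
    rw [emit_eq_subgcd ((b+a).toNat) _ _ _ ha hab le_rfl le_rfl]
  · -- not swapped: hi = a, lo = b, with b ≤ a
    have hba : b ≤ a := by omega
    simp only [hab, if_false, max_eq_left hba, min_eq_right hba]
    rw [loopA_eq_subgcd _ _ _ _ ha hb le_rfl]
    by_cases heq : a = b
    · simp [heq]
    · simp only [heq, if_false]
      rw [emit_eq_subgcd ((a+b).toNat) _ _ _ hb (by omega) le_rfl le_rfl]
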